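-- pv_equiv track=rewrite | github.com/glee1228/TIL | 인공지능실습/ch1/practice/submission.py | mutateSentences
-- ===== SOURCE A (Python) =====
-- def mutateSentences(sentence):
--     """
--     High-level idea: generate sentences similar to a given sentence.
--     Given a sentence (sequence of words), return a list of all possible
--     alternative sentences of the same length, where each pair of adjacent words
--     also occurs in the original sentence. (The words within each pair should appear
--     in the same order in the output sentence as they did in the orignal sentence.)
--     Notes:
--     - The order of the sentences you output doesn't matter.
--     - You must not output duplicates.
--     - Your generated sentence can use a word in the original sentence more than
--       once.
--     """
--     # BEGIN_YOUR_CODE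
--     input_words = sentence.split()
--     word_set = set(input_words)
--     next_word_set_dict = {word: set() for word in word_set}
--
--     for i in range(len(input_words) - 1):
--         next_word_set_dict[input_words[i]].add(input_words[i + 1])
--
--     sentences = []
--     stack = []
--
--     def mutate_sentence_r(word):
--         stack.append(word)          # push something
--         if len(stack) == len(input_words):
--             sentences.append(' '.join(stack))
--         else:
--             for next_word in next_word_set_dict[word]:
--                 mutate_sentence_r(next_word)
--         stack.pop()
--
--     for word in word_set:
--         mutate_sentence_r(word)
--
--     return sentences
-- ===== SOURCE B (Python) =====
-- def mutateSentences(sentence):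
--     words = sentence.split()
--     distinct = list(dict.fromkeys(words))
--     adj = {w: [] for w in distinct}
--     for i in range(len(words) - 1):
--         nxts = adj[words[i]]
--         if words[i + 1] not in nxts:
--             nxts.append(words[i + 1])
--     paths = [[w] for w in distinct]
--     for _ in range(len(words) - 1):
--         paths = [p + [w] for p in paths for w in adj[p[-1]]]
--     return [' '.join(p) for p in paths]
-- ===== Notes on version B (the rewrite author's own statement) =====
-- stated objective: alternative
-- what changed: Replaces A's recursive DFS with an explicit shared stack by an iterative level-by-level expansion: start from each distinct word as a one-word path and rebuild the path list n-1 times by extending every path with the successors of its last word, using insertion-ordered adjacency lists instead of sets (output compared as a set).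
import Mathlib
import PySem

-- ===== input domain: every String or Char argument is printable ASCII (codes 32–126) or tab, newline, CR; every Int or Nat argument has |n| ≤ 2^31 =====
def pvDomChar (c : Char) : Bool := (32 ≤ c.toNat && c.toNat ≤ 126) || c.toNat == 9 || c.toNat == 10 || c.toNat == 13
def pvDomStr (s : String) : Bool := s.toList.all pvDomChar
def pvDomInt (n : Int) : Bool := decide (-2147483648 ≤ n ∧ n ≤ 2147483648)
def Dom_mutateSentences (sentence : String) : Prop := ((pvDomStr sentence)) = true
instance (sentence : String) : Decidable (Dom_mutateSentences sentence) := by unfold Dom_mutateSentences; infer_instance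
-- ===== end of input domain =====

-- B replaces A's recursive DFS over a shared mutable stack by an iterative level-by-level
-- expansion of partial paths (objective: alternative decomposition, same cost).
-- The return value is compared as a set (the Python output order follows set iteration order);
-- both ports realise sets as insertion-ordered duplicate-free lists (PySem.Set).

-- ===== PORT A =====
-- the recursive helper mutate_sentence_r: `stack` is the stack below the pushed `word`,
-- `sentences` the accumulator; `fuel = n - len(stack)` bounds the recursion depth
-- (the Python recursion pushes only while len(stack) < n, so fuel never reaches 0 there).
def pvDfsA (adj : PySem.Dict String (PySem.Set String)) (n : Nat) :
    Nat → List String → String → List String → List String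
  | fuel, stack, word, sentences =>
    let stack' := stack ++ [word]
    if stack'.length = n then sentences ++ [PySem.Str.join " " stack']
    else
      match fuel with
      | 0 => sentences
      | f + 1 =>
        List.foldl (fun acc w => pvDfsA adj n f stack' w acc) sentences
          (PySem.Dict.getD adj word PySem.Set.empty)

def mutateSentences (sentence : String) : List String :=
  let inputWords := PySem.Str.split₀ sentence
  let wordSet := PySem.Set.ofList inputWords
  let adj0 : PySem.Dict String (PySem.Set String) :=
    wordSet.foldl (fun d w => PySem.Dict.insert d w PySem.Set.empty) PySem.Dict.empty
  let adj := (PySem.List.pyRange 0 ((inputWords.length : Int) - 1)).foldl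
    (fun d i => PySem.Dict.modify d (PySem.List.pyGetD inputWords i "") PySem.Set.empty
      (fun s => PySem.Set.add s (PySem.List.pyGetD inputWords (i + 1) ""))) adj0
  wordSet.foldl (fun acc w => pvDfsA adj inputWords.length inputWords.length [] w acc) []

-- ===== PORT B =====
-- one-step extension of a partial path p: `[p + [w] for w in adj[p[-1]]]`
def pvExtendB (adj : PySem.Dict String (List String)) (p : List String) : List (List String) :=
  (PySem.Dict.getD adj (PySem.List.pyGetD p (-1) "") []).map (fun w => p ++ [w])

def mutateSentences_alt (sentence : String) : List String :=
  let words := PySem.Str.split₀ sentence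
  let distinct := PySem.List.dedup words
  let adj0 : PySem.Dict String (List String) :=
    distinct.foldl (fun d w => PySem.Dict.insert d w []) PySem.Dict.empty
  let adj := (PySem.List.pyRange 0 ((words.length : Int) - 1)).foldl
    (fun d i => PySem.Dict.modify d (PySem.List.pyGetD words i "") []
      (fun nxts => if nxts.contains (PySem.List.pyGetD words (i + 1) "") then nxts
                   else nxts ++ [PySem.List.pyGetD words (i + 1) ""])) adj0
  let paths := distinct.map (fun w => [w])
  let final := (PySem.List.pyRange 0 ((words.length : Int) - 1)).foldl
    (fun ps _ => ps.flatMap (pvExtendB adj)) paths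
  final.map (fun p => PySem.Str.join " " p)

-- ===== PRECONDITION & SPEC =====
def Spec_mutateSentences (sentence : String) (out : List String) : Prop := out = mutateSentences_alt sentence
instance (sentence : String) (out : List String) : Decidable (Spec_mutateSentences sentence out) := by unfold Spec_mutateSentences; infer_instance

-- ===== CLAIM (what is proved, stated in full; the proofs are below) =====
def Claim_equal_mutateSentences : Prop := ∀ (sentence : String), Dom_mutateSentences sentence → Spec_mutateSentences sentence (mutateSentences sentence)

-- ===== LEMMAS AND PROOFS =====

-- the set of paths obtained from partial path p by k one-step extensions
def pvGrow (adj : PySem.Dict String (List String)) : Nat → List String → List (List String)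
  | 0, p => [p]
  | k + 1, p =>
    (PySem.Dict.getD adj (PySem.List.pyGetD p (-1) "") []).flatMap
      (fun w => pvGrow adj k (p ++ [w]))

theorem pvGetD_neg_one_append {α : Type} (xs : List α) (x d : α) :
    PySem.List.pyGetD (xs ++ [x]) (-1) d = x := by
  simp [PySem.List.pyGetD, PySem.List.pyGet?, PySem.List.pyIdx?]

theorem pvExtend_grow (adj : PySem.Dict String (List String)) (k : Nat) (p : List String) :
    (pvExtendB adj p).flatMap (pvGrow adj k) = pvGrow adj (k + 1) p := by
  simp [pvExtendB, pvGrow, List.flatMap_map]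

theorem pvRounds_eq (adj : PySem.Dict String (List String)) (l : List Int)
    (ps : List (List String)) :
    l.foldl (fun ps _ => ps.flatMap (pvExtendB adj)) ps = ps.flatMap (pvGrow adj l.length) := by
  induction l generalizing ps with
  | nil => simp [pvGrow]
  | cons a l ih =>
    simp only [List.foldl_cons, ih, List.flatMap_assoc, List.length_cons]
    exact List.flatMap_congr (fun p _ => pvExtend_grow adj l.length p)

theorem pvDfs_eq (adj : PySem.Dict String (PySem.Set String)) (n : Nat) :
    ∀ (fuel : Nat) (stack : List String) (word : String) (acc : List String),
      fuel + stack.length = n → stack.length < n →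
      pvDfsA adj n fuel stack word acc =
        acc ++ (pvGrow adj (n - (stack.length + 1)) (stack ++ [word])).map (PySem.Str.join " ") := by
  intro fuel
  induction fuel with
  | zero => intro stack word acc h hl; omega
  | succ f ih =>
    intro stack word acc h hl
    by_cases hn : (stack ++ [word]).length = n
    · have h0 : n - (stack.length + 1) = 0 := by
        simp only [List.length_append, List.length_cons, List.length_nil] at hn; omega
      rw [pvDfsA]
      simp [hn, h0, pvGrow]
    · have hlen : (stack ++ [word]).length = stack.length + 1 := by simp
      have hlt : stack.length + 1 < n := by rw [hlen] at hn; omega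
      have hk : n - (stack.length + 1) = (n - (stack.length + 2)) + 1 := by omega
      rw [pvDfsA]
      simp only [hn, if_false]
      rw [PySem.List.foldl_congr_mem' (PySem.Dict.getD adj word PySem.Set.empty)
            (fun acc w => pvDfsA adj n f (stack ++ [word]) w acc)
            (fun acc w => acc ++ (pvGrow adj (n - ((stack ++ [word]).length + 1))
              ((stack ++ [word]) ++ [w])).map (PySem.Str.join " ")) acc
            (fun w _ acc' => ih (stack ++ [word]) w acc' (by rw [hlen]; omega) (by rw [hlen]; omega)),
          PySem.List.foldl_append_eq_flatMap, hk, pvGrow, pvGetD_neg_one_append,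
          List.map_flatMap]
      simp [hlen]

theorem pvAdj_eq (words : List String) :
    ((PySem.List.pyRange 0 ((words.length : Int) - 1)).foldl
      (fun d i => PySem.Dict.modify d (PySem.List.pyGetD words i "") PySem.Set.empty
        (fun s => PySem.Set.add s (PySem.List.pyGetD words (i + 1) "")))
      ((PySem.Set.ofList words).foldl
        (fun d w => PySem.Dict.insert d w PySem.Set.empty) PySem.Dict.empty)) =
    ((PySem.List.pyRange 0 ((words.length : Int) - 1)).foldl
      (fun d i => PySem.Dict.modify d (PySem.List.pyGetD words i "") []
        (fun nxts => if nxts.contains (PySem.List.pyGetD words (i + 1) "") then nxts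
                     else nxts ++ [PySem.List.pyGetD words (i + 1) ""]))
      ((PySem.List.dedup words).foldl
        (fun d w => PySem.Dict.insert d w []) PySem.Dict.empty)) := by
  rw [PySem.List.dedup_eq_ofList]
  rfl

-- ===== VERDICT (by name: the statement is the Claim_ definition above) =====
theorem pvMain (adj : PySem.Dict String (PySem.Set String)) (words : List String)
    (h : words ≠ []) :
    (PySem.Set.ofList words).foldl
        (fun acc w => pvDfsA adj words.length words.length [] w acc) [] =
      ((PySem.List.pyRange 0 ((words.length : Int) - 1)).foldl
          (fun ps _ => ps.flatMap (pvExtendB adj))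
          ((PySem.Set.ofList words).map (fun w => [w]))).map
        (fun p => PySem.Str.join " " p) := by
  have hn : 0 < words.length := List.length_pos_of_ne_nil h
  have hcast : ((words.length : Int) - 1) = ((words.length - 1 : Nat) : Int) := by omega
  have hlenr : (PySem.List.pyRange 0 ((words.length : Int) - 1)).length = words.length - 1 := by
    rw [hcast, PySem.List.pyRange_zero_natCast]; simp
  rw [pvRounds_eq, hlenr,
      PySem.List.foldl_congr_mem' (PySem.Set.ofList words)
        (fun acc w => pvDfsA adj words.length words.length [] w acc)
        (fun acc w => acc ++ (pvGrow adj (words.length - 1) [w]).map (PySem.Str.join " ")) []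
        (fun w _ acc => by
          show pvDfsA adj words.length words.length [] w acc
            = acc ++ List.map (PySem.Str.join " ") (pvGrow adj (words.length - 1) [w])
          rw [pvDfs_eq adj words.length words.length [] w acc (by simp) (by simpa using hn)]
          simp),
      PySem.List.foldl_append_eq_flatMap, List.map_flatMap, List.flatMap_map]
  simp

theorem mutateSentences_spec : Claim_equal_mutateSentences := by
  intro sentence _
  show mutateSentences sentence = mutateSentences_alt sentence
  simp only [mutateSentences, mutateSentences_alt]
  rw [← pvAdj_eq (PySem.Str.split₀ sentence), PySem.List.dedup_eq_ofList]
  by_cases hw : PySem.Str.split₀ sentence = []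
  · simp [hw, PySem.Set.ofList]
  · exact pvMain _ _ hw
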